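-- pv_equiv track=rewrite | github.com/Yang-Ryan/Scrabble-AI-Agent | utils.py | get_rack_after_move
-- ===== SOURCE A (Python) =====
-- from typing import List, Dict, Set, Tuple, Optional
--
-- def get_rack_after_move(original_rack: List[str], tiles_used: List[str],
--                        tiles_drawn: List[str]) -> List[str]:
--     """
--     Calculate rack after making a move
--
--     Args:
--         original_rack: Tiles before move
--         tiles_used: Tiles used in move
--         tiles_drawn: New tiles drawn from bag
--
--     Returns:
--         New rack after move
--     """
--     new_rack = original_rack.copy()
--
--     # Remove used tiles
--     for tile in tiles_used:
--         if tile in new_rack: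
--             new_rack.remove(tile)
--
--     # Add newly drawn tiles
--     new_rack.extend(tiles_drawn)
--
--     return new_rack
-- ===== SOURCE B (Python) =====
-- def get_rack_after_move(original_rack, tiles_used, tiles_drawn):
--     # One pass over the rack consulting a count table of used tiles,
--     # instead of repeated list.remove scans.
--     need = {}
--     for tile in tiles_used:
--         need[tile] = need.get(tile, 0) + 1
--     new_rack = []
--     for tile in original_rack:
--         c = need.get(tile, 0)
--         if c:
--             need[tile] = c - 1
--         else:
--             new_rack.append(tile)
--     new_rack.extend(tiles_drawn)
--     return new_rack
-- ===== Notes on version B (the rewrite author's own statement) =====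
-- stated objective: faster
-- what changed: Replaces A's loop over tiles_used with a membership test and list.remove scan per used tile by building a count table of tiles_used once and doing a single pass over the rack that skips a tile while its remaining count is positive.
import Mathlib
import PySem

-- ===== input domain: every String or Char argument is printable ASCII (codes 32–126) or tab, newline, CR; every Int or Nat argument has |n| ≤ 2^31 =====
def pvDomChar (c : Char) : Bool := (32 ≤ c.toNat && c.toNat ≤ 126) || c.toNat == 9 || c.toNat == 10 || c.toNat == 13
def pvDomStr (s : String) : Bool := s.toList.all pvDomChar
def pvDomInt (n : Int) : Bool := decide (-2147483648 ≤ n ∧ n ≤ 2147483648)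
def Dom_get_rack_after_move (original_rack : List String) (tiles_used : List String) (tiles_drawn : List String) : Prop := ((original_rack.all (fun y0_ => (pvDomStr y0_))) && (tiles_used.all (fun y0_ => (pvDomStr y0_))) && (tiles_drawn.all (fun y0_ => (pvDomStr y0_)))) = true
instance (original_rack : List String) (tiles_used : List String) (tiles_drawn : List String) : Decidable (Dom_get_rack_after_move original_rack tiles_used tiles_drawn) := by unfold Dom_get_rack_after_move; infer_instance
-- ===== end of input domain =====

-- B replaces A's per-used-tile list.remove scans by one pass over the rack consulting a
-- count table of the used tiles (objective: faster, O(r+u) vs O(r·u)).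

-- ===== PORT A =====
def get_rack_after_move (original_rack : List String) (tiles_used : List String) (tiles_drawn : List String) : List String :=
  -- new_rack = copy; for tile in tiles_used: if tile in new_rack: new_rack.remove(tile)
  let new_rack := tiles_used.foldl
    (fun r tile => if tile ∈ r then (PySem.List.remove? r tile).getD r else r)
    original_rack
  -- new_rack.extend(tiles_drawn)
  new_rack ++ tiles_drawn

-- ===== PORT B =====
def get_rack_after_move_alt (original_rack : List String) (tiles_used : List String) (tiles_drawn : List String) : List String :=
  -- need = {}; for tile in tiles_used: need[tile] = need.get(tile, 0) + 1
  let need : PySem.Dict String Int := tiles_used.foldl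
    (fun d tile => d.insert tile (d.getD tile 0 + 1)) PySem.Dict.empty
  -- for tile in original_rack: c = need.get(tile, 0); if c: need[tile] = c-1 else: new_rack.append(tile)
  let st := original_rack.foldl
    (fun (st : PySem.Dict String Int × List String) tile =>
      let c := st.1.getD tile 0
      if c ≠ 0 then (st.1.insert tile (c - 1), st.2)
      else (st.1, st.2 ++ [tile]))
    (need, [])
  -- new_rack.extend(tiles_drawn)
  st.2 ++ tiles_drawn

-- ===== PRECONDITION & SPEC =====
def Spec_get_rack_after_move (original_rack : List String) (tiles_used : List String) (tiles_drawn : List String) (out : List String) : Prop := out = get_rack_after_move_alt original_rack tiles_used tiles_drawn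
instance (original_rack : List String) (tiles_used : List String) (tiles_drawn : List String) (out : List String) : Decidable (Spec_get_rack_after_move original_rack tiles_used tiles_drawn out) := by unfold Spec_get_rack_after_move; infer_instance

-- ===== CLAIM (what is proved, stated in full; the proofs are below) =====
def Claim_equal_get_rack_after_move : Prop := ∀ (original_rack : List String) (tiles_used : List String) (tiles_drawn : List String), Dom_get_rack_after_move original_rack tiles_used tiles_drawn → Spec_get_rack_after_move original_rack tiles_used tiles_drawn (get_rack_after_move original_rack tiles_used tiles_drawn)

-- ===== LEMMAS AND PROOFS =====

-- canonical middle form: scan the rack with an abstract count function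
def pvScan (c : String → Int) : List String → List String
  | [] => []
  | x :: xs => if c x ≠ 0 then pvScan (fun y => if y = x then c x - 1 else c y) xs
               else x :: pvScan c xs

theorem pvScan_congr (c c' : String → Int) (r : List String)
    (h : ∀ x ∈ r, c x = c' x) : pvScan c r = pvScan c' r := by
  induction r generalizing c c' with
  | nil => rfl
  | cons x xs ih =>
    have hx := h x (by simp)
    simp only [pvScan, hx]
    split
    · exact ih _ _ (fun y hy => by by_cases hyx : y = x <;> simp [hyx, h y (List.mem_cons_of_mem _ hy)])
    · rw [ih _ _ (fun y hy => h y (List.mem_cons_of_mem _ hy))]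

theorem pvScan_zero (r : List String) : pvScan (fun _ => 0) r = r := by
  induction r with
  | nil => rfl
  | cons x xs ih => simp [pvScan, ih]

-- A's single step
def pvStepA (r : List String) (tile : String) : List String :=
  if tile ∈ r then (PySem.List.remove? r tile).getD r else r

theorem pvScan_inc (c : String → Int) (t : String) (r : List String)
    (hc : ∀ x, 0 ≤ c x) :
    pvScan (fun y => if y = t then c t + 1 else c y) r = pvScan c (pvStepA r t) := by
  induction r generalizing c with
  | nil => simp [pvStepA, pvScan]
  | cons x xs ih =>
    by_cases hxt : x = t
    · subst hxt
      have h1 : c x + 1 ≠ 0 := by have := hc x; omega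
      simp only [pvScan, pvStepA, List.mem_cons, true_or, if_true,
        PySem.List.remove?_cons_self, Option.getD_some]
      rw [if_pos (by simp [h1])]
      exact pvScan_congr _ _ _ (fun y _ => by by_cases hy : y = x <;> simp [hy])
    · have hstep : pvStepA (x :: xs) t = if t ∈ xs then x :: pvStepA xs t else x :: xs := by
        by_cases ht : t ∈ xs
        · obtain ⟨r', hr'⟩ := Option.ne_none_iff_exists'.mp
            ((not_iff_not.mpr (PySem.List.remove?_eq_none_iff (xs := xs) (v := t))).mpr
              (by simpa using ht))
          simp [pvStepA, ht, PySem.List.remove?_cons_of_ne xs hxt, hr']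
        · simp [pvStepA, ht, Ne.symm hxt]
      by_cases hcx : c x = 0
      · -- head kept on both sides
        have hL : pvScan (fun y => if y = t then c t + 1 else c y) (x :: xs)
            = x :: pvScan (fun y => if y = t then c t + 1 else c y) xs := by
          simp only [pvScan]; rw [if_neg (by simp [hxt, hcx])]
        rw [hL, hstep]
        by_cases ht : t ∈ xs
        · rw [if_pos ht]
          simp only [pvScan]
          rw [if_neg (by simp [hcx]), ih c hc]
        · rw [if_neg ht]
          have hA2 : pvStepA xs t = xs := by simp [pvStepA, ht]
          simp only [pvScan]
          rw [if_neg (by simp [hcx]), ih c hc, hA2]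
      · -- head consumed on both sides
        have hcdec : ∀ z, 0 ≤ (fun z => if z = x then c x - 1 else c z) z := by
          intro z; by_cases hz : z = x <;> simp [hz] <;> [skip; exact hc z]
          have := hc x; omega
        have hL : pvScan (fun y => if y = t then c t + 1 else c y) (x :: xs)
            = pvScan (fun y => if y = t then (if t = x then c x - 1 else c t) + 1
                else if y = x then c x - 1 else c y) xs := by
          simp only [pvScan]
          rw [if_pos (by simp [hxt, hcx])]
          refine pvScan_congr _ _ _ (fun y _ => ?_)
          by_cases hy : y = x <;> by_cases hy2 : y = t <;>
            simp [hy, hy2, hxt, Ne.symm hxt]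
        rw [hL, ih (fun z => if z = x then c x - 1 else c z) hcdec, hstep]
        by_cases ht : t ∈ xs
        · rw [if_pos ht]
          simp only [pvScan]
          rw [if_pos (by simpa using hcx)]
        · rw [if_neg ht]
          have hA2 : pvStepA xs t = xs := by simp [pvStepA, ht]
          rw [hA2]
          simp only [pvScan]
          rw [if_pos (by simpa using hcx)]

theorem foldA_eq_pvScan (tiles_used r : List String) :
    tiles_used.foldl pvStepA r = pvScan (fun y => (tiles_used.count y : Int)) r := by
  induction tiles_used generalizing r with
  | nil => simpa using (pvScan_zero r).symm
  | cons t us ih =>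
    simp only [List.foldl_cons]
    rw [ih (pvStepA r t), ← pvScan_inc _ t r (fun x => by positivity)]
    refine (pvScan_congr _ _ _ (fun y _ => ?_)).symm
    by_cases hy : y = t
    · subst hy; simp
    · have hty : t ≠ y := fun h => hy h.symm
      simp [hy, hty]

-- B-side: getD after building the count table
theorem getD_buildNeed (tiles_used : List String) (d0 : PySem.Dict String Int) (v : String) :
    (tiles_used.foldl (fun d tile => d.insert tile (d.getD tile 0 + 1)) d0).getD v 0
      = d0.getD v 0 + tiles_used.count v := by
  induction tiles_used generalizing d0 with
  | nil => simp
  | cons t us ih =>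
    simp only [List.foldl_cons, ih, List.count_cons]
    by_cases hv : v = t
    · subst hv
      simp [PySem.Dict.getD, PySem.Dict.get?_insert_self]
      push_cast
      ring
    · simp [PySem.Dict.getD, PySem.Dict.get?_insert_of_ne, hv, Ne.symm]

-- B-side: the rack loop is acc ++ pvScan of the table's counts
theorem foldB_eq_pvScan (r : List String) (d : PySem.Dict String Int) (acc : List String) :
    (r.foldl (fun (st : PySem.Dict String Int × List String) tile =>
        let c := st.1.getD tile 0
        if c ≠ 0 then (st.1.insert tile (c - 1), st.2)
        else (st.1, st.2 ++ [tile])) (d, acc)).2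
      = acc ++ pvScan (fun y => d.getD y 0) r := by
  induction r generalizing d acc with
  | nil => simp [pvScan]
  | cons x xs ih =>
    simp only [List.foldl_cons, pvScan]
    by_cases hc : d.getD x 0 = 0
    · rw [if_neg (by simpa using hc), if_neg (by simpa using hc), ih]
      simp
    · rw [if_pos (by simpa using hc), if_pos (by simpa using hc), ih]
      congr 1
      refine pvScan_congr _ _ _ (fun y _ => ?_)
      by_cases hy : y = x <;> simp [PySem.Dict.getD, PySem.Dict.get?_insert_self,
        PySem.Dict.get?_insert_of_ne, hy]

-- ===== VERDICT (by name: the statement is the Claim_ definition above) =====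
theorem get_rack_after_move_spec : Claim_equal_get_rack_after_move := by
  intro original_rack tiles_used tiles_drawn _
  show (tiles_used.foldl pvStepA original_rack) ++ tiles_drawn
      = (original_rack.foldl (fun (st : PySem.Dict String Int × List String) tile =>
          let c := st.1.getD tile 0
          if c ≠ 0 then (st.1.insert tile (c - 1), st.2)
          else (st.1, st.2 ++ [tile]))
        (tiles_used.foldl (fun d tile => d.insert tile (d.getD tile 0 + 1))
          PySem.Dict.empty, [])).2 ++ tiles_drawn
  rw [foldA_eq_pvScan, foldB_eq_pvScan, List.nil_append]
  congr 1
  refine pvScan_congr _ _ _ (fun y _ => ?_)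
  rw [getD_buildNeed]
  simp
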